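-- pv_equiv track=rewrite | github.com/digital-asset/daml-finance | scripts/sort-daml-imports.py | sort_within_parentheses
-- ===== SOURCE A (Python) =====
-- from collections import deque
--
-- def sort_within_parentheses(import_line):
--     stack = deque()
--     fragments = []
--     sorted_import_line = import_line
--
--     for i, char in enumerate(import_line):
--         if char == '(':
--             stack.append(i)
--         elif char == ')' and stack:
--             start = stack.pop()
--             if not stack:
--                 in_brackets = import_line[start + 1:i]
--                 in_brackets_split = [x.strip() for x in in_brackets.split(',')]
--                 # Separate items starting with '('
--                 special_items = [x for x in in_brackets_split if x.startswith('(')]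
--                 # Sort other items, capital letters first
--                 regular_items = sorted([x for x in in_brackets_split if not x.startswith('(')],
--                                        key=lambda x: (x[0].islower(), x))
--                 # Concatenate the sorted regular items with the special items
--                 sorted_in_brackets = ', '.join(regular_items + special_items)
--                 fragments.append((start, i, sorted_in_brackets))
--
--     for start, end, fragment in reversed(fragments):
--         sorted_import_line = sorted_import_line[:start + 1] + fragment + sorted_import_line[end:]
--
--     return sorted_import_line
-- ===== SOURCE B (Python) =====
-- def _sort_group(content):
--     items = [x.strip() for x in content.split(',')]
--     special = [x for x in items if x.startswith('(')]
--     regular = sorted([x for x in items if not x.startswith('(')],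
--                      key=lambda x: (x[0].islower(), x))
--     return ', '.join(regular + special)
--
--
-- def sort_within_parentheses(import_line):
--     # One forward pass: emit characters directly; buffer the inside of each
--     # top-level parenthesized group and emit it sorted when it closes.
--     out = []
--     buf = []
--     depth = 0
--     for ch in import_line:
--         if depth == 0:
--             if ch == '(':
--                 depth = 1
--                 out.append('(')
--             else:
--                 out.append(ch)
--         elif ch == '(':
--             depth += 1
--             buf.append(ch)
--         elif ch == ')':
--             depth -= 1
--             if depth == 0:
--                 out.append(_sort_group(''.join(buf)))
--                 out.append(')')
--                 buf = []
--             else: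
--                 buf.append(ch)
--         else:
--             buf.append(ch)
--     if depth > 0:
--         out.append(''.join(buf))
--     return ''.join(out)
-- ===== Notes on version B (the rewrite author's own statement) =====
-- stated objective: alternative
-- what changed: A scans with a stack of indices collecting (start,end,fragment) tuples and then splices them into the string right-to-left with repeated full-string slicing; B is a single forward pass with a depth counter and a buffer that emits the output directly, sorting each top-level group's content the moment its ')' is seen.
import Mathlib
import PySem

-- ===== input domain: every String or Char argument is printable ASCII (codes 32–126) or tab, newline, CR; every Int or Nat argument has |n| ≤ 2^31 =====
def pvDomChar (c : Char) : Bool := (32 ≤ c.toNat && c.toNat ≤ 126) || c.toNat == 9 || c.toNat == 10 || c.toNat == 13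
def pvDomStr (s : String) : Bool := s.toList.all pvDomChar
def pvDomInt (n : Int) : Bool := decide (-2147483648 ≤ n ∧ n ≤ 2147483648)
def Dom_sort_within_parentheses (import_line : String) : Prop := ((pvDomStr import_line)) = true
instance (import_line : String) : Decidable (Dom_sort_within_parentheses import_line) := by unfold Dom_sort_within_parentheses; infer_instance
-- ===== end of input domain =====

-- B rewrites A's two-phase scheme (collect (start,end,fragment) spans, then splice slices in reverse)
-- as one forward pass with a depth counter and a buffer that emits the output directly (objective: alternative).

-- Shared by both ports: BOTH Pythons contain this identical split/strip/sort of a group's content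
-- (in A it is inline in the scanning loop, in B it is the helper _sort_group).
-- Python's sort key (x[0].islower(), x) is encoded as the char list (marker :: x) with marker '1' for
-- islower else '0': lexicographic comparison of these lists is exactly Python's tuple comparison.
-- x[0] is ported as pyGetD x 0 ' ' — total; Python raises IndexError on an empty item, excluded by Pre_.
def pvSortGroup (g : List Char) : List Char :=
  let items := (PySem.Chars.splitOn g [',']).map PySem.Chars.strip
  let special := items.filter (fun x => PySem.Chars.startswith x ['('])
  let regular := PySem.List.sorted (items.filter (fun x => !PySem.Chars.startswith x ['(']))
      (fun x => (if PySem.Chars.islower (PySem.List.pyGetD x 0 ' ') then '1' else '0') :: x) false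
  PySem.Chars.join [',', ' '] (regular ++ special)

-- ===== PORT A =====
-- one step of A's 'for i, char in enumerate(import_line)' loop; state = (stack, fragments)
def pvAStep (cs : List Char) (st : List Int × List (Int × Int × List Char)) (p : Int × Char) :
    List Int × List (Int × Int × List Char) :=
  let stack := st.1
  let fragments := st.2
  let i := p.1
  let char := p.2
  if char = '(' then (stack ++ [i], fragments)
  else if char = ')' ∧ stack ≠ [] then
    let start := stack.getLastD 0       -- stack.pop() (stack is nonempty here)
    let stack' := stack.dropLast
    if stack' = [] then
      let in_brackets := PySem.List.slice cs (some (start + 1)) (some i)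
      (stack', fragments ++ [(start, i, pvSortGroup in_brackets)])
    else (stack', fragments)
  else (stack, fragments)

def sort_within_parentheses (import_line : String) : String :=
  let cs := import_line.toList
  let res := (PySem.List.enumerate cs 0).foldl (pvAStep cs) ([], [])
  -- for start, end, fragment in reversed(fragments): splice
  let sorted_line := res.2.reverse.foldl
    (fun acc f =>
      PySem.List.slice acc none (some (f.1 + 1)) ++ f.2.2 ++ PySem.List.slice acc (some f.2.1) none)
    cs
  String.ofList sorted_line

-- ===== PORT B =====
-- single forward pass: out is the output built so far, buf the inside of the currently open
-- top-level group, depth the parenthesis nesting depth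
def pvAltGo : List Char → Nat → List Char → List Char → List Char
  | [], depth, out, buf => if depth > 0 then out ++ buf else out
  | c :: rest, depth, out, buf =>
    if depth = 0 then
      if c = '(' then pvAltGo rest 1 (out ++ ['(']) buf
      else pvAltGo rest 0 (out ++ [c]) buf
    else if c = '(' then pvAltGo rest (depth + 1) out (buf ++ [c])
    else if c = ')' then
      if depth - 1 = 0 then pvAltGo rest 0 (out ++ pvSortGroup buf ++ [')']) []
      else pvAltGo rest (depth - 1) out (buf ++ [c])
    else pvAltGo rest depth out (buf ++ [c])

def sort_within_parentheses_alt (import_line : String) : String :=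
  String.ofList (pvAltGo import_line.toList 0 [] [])

-- ===== PRECONDITION & SPEC =====
-- pvMatch cs d: scanning cs at nesting depth d ≥ 1, find the ')' that brings the depth to 0;
-- some (g, rest) means cs = g ++ ')' :: rest with that ')' the matching close; none = unmatched.
def pvMatch : List Char → Nat → Option (List Char × List Char)
  | [], _ => none
  | c :: r, d =>
    if c = '(' then (pvMatch r (d + 1)).map (fun gr => ('(' :: gr.1, gr.2))
    else if c = ')' then
      if d = 1 then some ([], r)
      else (pvMatch r (d - 1)).map (fun gr => (')' :: gr.1, gr.2))
    else (pvMatch r d).map (fun gr => (c :: gr.1, gr.2))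

-- the contents of the matched top-level '( … )' groups of cs, left to right
-- (fuel-based structural recursion — pvMatch only returns suffixes, so cs.length fuel suffices)
def pvTopGroupsF : Nat → List Char → List (List Char)
  | 0, _ => []
  | _, [] => []
  | fuel + 1, c :: r =>
    if c = '(' then
      match pvMatch r 1 with
      | none => []
      | some (g, rest) => g :: pvTopGroupsF fuel rest
    else pvTopGroupsF fuel r

def pvTopGroups (cs : List Char) : List (List Char) := pvTopGroupsF cs.length cs

-- Pre_ excludes exactly the inputs on which Python A raises IndexError (x[0] in the sort key):
-- a matched top-level group one of whose comma-separated items is empty after strip.  Both Lean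
-- ports are total (the sort key reads x[0] through pyGetD with a default), so the proof below in
-- fact never needs the hypothesis; Pre_ only delimits where the Pythons return.
def Pre_sort_within_parentheses (import_line : String) : Prop :=
  ∀ g ∈ pvTopGroups import_line.toList,
    ∀ x ∈ (PySem.Chars.splitOn g [',']).map PySem.Chars.strip, x ≠ []
instance (import_line : String) : Decidable (Pre_sort_within_parentheses import_line) := by
  unfold Pre_sort_within_parentheses; infer_instance

def pvWitness_sort_within_parentheses : String := "import Foo (b, A, (..), c)"

def Spec_sort_within_parentheses (import_line : String) (out : String) : Prop :=
  out = sort_within_parentheses_alt import_line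
instance (import_line : String) (out : String) : Decidable (Spec_sort_within_parentheses import_line out) := by
  unfold Spec_sort_within_parentheses; infer_instance

-- ===== CLAIM (what is proved, stated in full; the proofs are below) =====
def Claim_equal_sort_within_parentheses : Prop :=
  ∀ (import_line : String), Dom_sort_within_parentheses import_line →
    Pre_sort_within_parentheses import_line →
      Spec_sort_within_parentheses import_line (sort_within_parentheses import_line)

-- ===== LEMMAS AND PROOFS =====

theorem pvMatch_spec : ∀ (cs : List Char) (d : Nat) (g rest : List Char),
    pvMatch cs d = some (g, rest) → cs = g ++ ')' :: rest := by
  intro cs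
  induction cs with
  | nil => intro d g rest h; simp [pvMatch] at h
  | cons c r ih =>
    intro d g rest h
    by_cases hc : c = '('
    · cases hm : pvMatch r (d + 1) with
      | none => simp [pvMatch, hc, hm] at h
      | some gr =>
        obtain ⟨g', rest'⟩ := gr
        simp [pvMatch, hc, hm] at h
        obtain ⟨h1, h2⟩ := h
        rw [ih (d + 1) g' rest' hm, hc, ← h1, ← h2]
        simp
    · by_cases hcr : c = ')'
      · by_cases hd : d = 1
        · simp [pvMatch, hc, hcr, hd] at h
          obtain ⟨rfl, rfl⟩ := h
          simp [hcr]
        · cases hm : pvMatch r (d - 1) with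
          | none => simp [pvMatch, hc, hcr, hd, hm] at h
          | some gr =>
            obtain ⟨g', rest'⟩ := gr
            simp [pvMatch, hc, hcr, hd, hm] at h
            obtain ⟨h1, h2⟩ := h
            rw [ih (d - 1) g' rest' hm, hcr, ← h1, ← h2]
            simp
      · cases hm : pvMatch r d with
        | none => simp [pvMatch, hc, hcr, hm] at h
        | some gr =>
          obtain ⟨g', rest'⟩ := gr
          simp [pvMatch, hc, hcr, hm] at h
          obtain ⟨h1, h2⟩ := h
          rw [ih d g' rest' hm, ← h1, ← h2]
          simp

theorem pvMatch_rest_length {cs : List Char} {d : Nat} {g rest : List Char}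
    (h : pvMatch cs d = some (g, rest)) : rest.length < cs.length := by
  have := pvMatch_spec cs d g rest h
  subst this
  simp
  omega

-- the common specification: pvS cs is the line with every matched top-level group sorted in place
def pvSF : Nat → List Char → List Char
  | 0, cs => cs
  | _, [] => []
  | fuel + 1, c :: r =>
    if c = '(' then
      match pvMatch r 1 with
      | none => c :: r
      | some (g, rest) => '(' :: (pvSortGroup g ++ ')' :: pvSF fuel rest)
    else c :: pvSF fuel r

def pvS (cs : List Char) : List Char := pvSF cs.length cs

theorem pvSF_fuel : ∀ (f1 : Nat), ∀ (cs : List Char), ∀ (f2 : Nat),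
    cs.length ≤ f1 → cs.length ≤ f2 → pvSF f1 cs = pvSF f2 cs := by
  intro f1
  induction f1 with
  | zero =>
    intro cs f2 h1 _
    have : cs = [] := by
      cases cs with
      | nil => rfl
      | cons a b => simp at h1
    subst this
    cases f2 <;> simp [pvSF]
  | succ f ih =>
    intro cs f2 h1 h2
    match cs with
    | [] => cases f2 <;> simp [pvSF]
    | c :: r =>
      match f2 with
      | 0 => simp at h2
      | f2' + 1 =>
        simp only [pvSF]
        by_cases hc : c = '('
        · simp only [hc, if_pos rfl]
          cases hm : pvMatch r 1 with
          | none => rfl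
          | some gr =>
            obtain ⟨g, rest⟩ := gr
            have hlen := pvMatch_rest_length hm
            simp only [hm, if_true]
            rw [ih rest f2' (by simp at h1; omega) (by simp at h2; omega)]
        · simp only [if_neg hc]
          rw [ih r f2' (by simp at h1; omega) (by simp at h2; omega)]

theorem pvS_nil : pvS [] = [] := rfl

theorem pvS_cons {c : Char} {r : List Char} (hc : c ≠ '(') : pvS (c :: r) = c :: pvS r := by
  unfold pvS
  simp only [List.length_cons, pvSF, if_neg hc]

theorem pvS_par_none {r : List Char} (hm : pvMatch r 1 = none) : pvS ('(' :: r) = '(' :: r := by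
  unfold pvS
  simp only [List.length_cons, pvSF, hm]
  simp only [if_true]

theorem pvS_par_some {r g rest : List Char} (hm : pvMatch r 1 = some (g, rest)) :
    pvS ('(' :: r) = '(' :: (pvSortGroup g ++ ')' :: pvS rest) := by
  unfold pvS
  simp only [List.length_cons, pvSF, hm]
  simp only [if_true]
  rw [pvSF_fuel r.length rest rest.length (by have := pvMatch_rest_length hm; omega) (le_refl _)]

-- == B = pvS ==

theorem pvAltGo_deep : ∀ (cs : List Char) (d : Nat) (out buf : List Char), 1 ≤ d →
    pvAltGo cs d out buf =
      match pvMatch cs d with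
      | none => (out ++ buf) ++ cs
      | some (g, rest) => pvAltGo rest 0 (out ++ pvSortGroup (buf ++ g) ++ [')']) [] := by
  intro cs
  induction cs with
  | nil =>
    intro d out buf hd
    have h0 : 0 < d := hd
    simp [pvAltGo, pvMatch, h0]
  | cons c r ih =>
    intro d out buf hd
    have hd0 : ¬ (d = 0) := by omega
    by_cases hc : c = '('
    · rw [show pvAltGo (c :: r) d out buf = pvAltGo r (d + 1) out (buf ++ [c]) by
        simp [pvAltGo, hd0, hc]]
      rw [ih (d + 1) out (buf ++ [c]) (by omega)]
      cases hm : pvMatch r (d + 1) with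
      | none => simp [pvMatch, hc, hm]
      | some gr => obtain ⟨g', rest'⟩ := gr; simp [pvMatch, hc, hm]
    · by_cases hcr : c = ')'
      · by_cases hd1 : d = 1
        · subst hd1
          rw [show pvAltGo (c :: r) 1 out buf
              = pvAltGo r 0 (out ++ pvSortGroup buf ++ [')']) [] by simp [pvAltGo, hc, hcr]]
          simp [pvMatch, hc, hcr]
        · rw [show pvAltGo (c :: r) d out buf = pvAltGo r (d - 1) out (buf ++ [c]) by
            simp [pvAltGo, hd0, hc, hcr, show ¬ (d - 1 = 0) by omega]]
          rw [ih (d - 1) out (buf ++ [c]) (by omega)]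
          cases hm : pvMatch r (d - 1) with
          | none => simp [pvMatch, hc, hcr, hd1, hm]
          | some gr => obtain ⟨g', rest'⟩ := gr; simp [pvMatch, hc, hcr, hd1, hm]
      · rw [show pvAltGo (c :: r) d out buf = pvAltGo r d out (buf ++ [c]) by
          simp [pvAltGo, hd0, hc, hcr]]
        rw [ih d out (buf ++ [c]) hd]
        cases hm : pvMatch r d with
        | none => simp [pvMatch, hc, hcr, hm]
        | some gr => obtain ⟨g', rest'⟩ := gr; simp [pvMatch, hc, hcr, hm]

theorem pvAltGo_top : ∀ (cs : List Char) (out : List Char),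
    pvAltGo cs 0 out [] = out ++ pvS cs := by
  intro cs
  induction hn : cs.length using Nat.strong_induction_on generalizing cs with
  | _ n ihn =>
    subst hn
    match cs with
    | [] => intro out; simp [pvAltGo, pvS_nil]
    | c :: r =>
      intro out
      by_cases hc : c = '('
      · subst hc
        rw [show pvAltGo ('(' :: r) 0 out [] = pvAltGo r 1 (out ++ ['(']) [] by
          simp [pvAltGo]]
        rw [pvAltGo_deep r 1 (out ++ ['(']) [] (by omega)]
        cases hm : pvMatch r 1 with
        | none => simp [pvS_par_none hm]
        | some gr =>
          obtain ⟨g, rest⟩ := gr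
          have hlt : rest.length < ('(' :: r).length := by
            have := pvMatch_rest_length hm
            simp
            omega
          simp only []
          rw [ihn rest.length hlt rest rfl]
          simp [pvS_par_some hm]
      · rw [show pvAltGo (c :: r) 0 out [] = pvAltGo r 0 (out ++ [c]) [] by
          simp [pvAltGo, hc]]
        rw [ihn r.length (by simp) r rfl]
        simp [pvS_cons hc]


-- == A's scanning loop, characterized ==

theorem pvAStep_deep (cs : List Char) (j : Int) :
    ∀ (suf : List Char) (n : Int) (s : List Int) (F : List (Int × Int × List Char)),
      (match pvMatch suf (s.length + 1) with
       | none => ((PySem.List.enumerate suf n).foldl (pvAStep cs) (j :: s, F)).2 = F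
       | some (g, rest) =>
           (PySem.List.enumerate suf n).foldl (pvAStep cs) (j :: s, F)
             = (PySem.List.enumerate rest (n + g.length + 1)).foldl (pvAStep cs)
                 ([], F ++ [(j, n + g.length,
                     pvSortGroup (PySem.List.slice cs (some (j + 1)) (some (n + g.length))))])) := by
  intro suf
  induction suf with
  | nil => intro n s F; simp [pvMatch, PySem.List.enumerate]
  | cons c r ih =>
    intro n s F
    rw [PySem.List.enumerate_cons, List.foldl_cons]
    by_cases hc : c = '('
    · have hstep : pvAStep cs (j :: s, F) (n, c) = (j :: (s ++ [n]), F) := by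
        simp [pvAStep, hc]
      rw [hstep]
      have key := ih (n + 1) (s ++ [n]) F
      simp only [List.length_append, List.length_cons, List.length_nil] at key
      rw [show s.length + (0 + 1) + 1 = s.length + 1 + 1 by omega] at key
      cases hm : pvMatch r (s.length + 1 + 1) with
      | none =>
        have hms : pvMatch (c :: r) (s.length + 1) = none := by
          simp [pvMatch, hc, hm]
        rw [hm] at key
        simp only [hms]
        exact key
      | some gr =>
        obtain ⟨g', rest'⟩ := gr
        have hms : pvMatch (c :: r) (s.length + 1) = some ('(' :: g', rest') := by
          simp [pvMatch, hc, hm]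
        rw [hm] at key
        simp only [hms]
        rw [show n + ((('(' :: g') : List Char).length : Int) = n + 1 + (g'.length : Int) by
          simp; omega]
        exact key
    · by_cases hcr : c = ')'
      · rcases s with _ | ⟨s0, s'⟩
        · -- depth 1: this ')' closes the group
          have hstep : pvAStep cs ((j :: [], F) : List Int × List (Int × Int × List Char)) (n, c)
              = ([], F ++ [(j, n, pvSortGroup (PySem.List.slice cs (some (j + 1)) (some n)))]) := by
            simp [pvAStep, hc, hcr]
          rw [hstep]
          have hms : pvMatch (c :: r) (([] : List Int).length + 1) = some ([], r) := by
            simp [pvMatch, hc, hcr]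
          simp only [hms]
          rw [show n + ((([] : List Char)).length : Int) = n by simp]
        · -- depth ≥ 2: pop one level, stay inside
          have hstep : pvAStep cs (j :: s0 :: s', F) (n, c)
              = (j :: (s0 :: s').dropLast, F) := by
            simp only [pvAStep, hc, hcr]
            simp [List.dropLast_cons_of_ne_nil]
          rw [hstep]
          have key := ih (n + 1) ((s0 :: s').dropLast) F
          cases hm : pvMatch r ((s0 :: s').dropLast.length + 1) with
          | none =>
            have hms : pvMatch (c :: r) ((s0 :: s').length + 1) = none := by
              simp only [pvMatch, if_neg (show ¬ (c = '(') from hc), if_pos hcr,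
                if_neg (show ¬ ((s0 :: s').length + 1 = 1) by simp)]
              rw [show (s0 :: s').length + 1 - 1 = (s0 :: s').dropLast.length + 1 by simp]
              rw [hm]
              rfl
            rw [hm] at key
            simp only [hms]
            exact key
          | some gr =>
            obtain ⟨g', rest'⟩ := gr
            have hms : pvMatch (c :: r) ((s0 :: s').length + 1) = some (')' :: g', rest') := by
              simp only [pvMatch, if_neg (show ¬ (c = '(') from hc), if_pos hcr,
                if_neg (show ¬ ((s0 :: s').length + 1 = 1) by simp)]
              rw [show (s0 :: s').length + 1 - 1 = (s0 :: s').dropLast.length + 1 by simp]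
              rw [hm]
              rfl
            rw [hm] at key
            simp only [hms]
            rw [show n + (((')' :: g') : List Char).length : Int) = n + 1 + (g'.length : Int) by
              simp; omega]
            exact key
      · have hstep : pvAStep cs (j :: s, F) (n, c) = (j :: s, F) := by
          simp [pvAStep, hc, hcr]
        rw [hstep]
        have key := ih (n + 1) s F
        cases hm : pvMatch r (s.length + 1) with
        | none =>
          have hms : pvMatch (c :: r) (s.length + 1) = none := by
            simp [pvMatch, hc, hcr, hm]
          rw [hm] at key
          simp only [hms]
          exact key
        | some gr =>
          obtain ⟨g', rest'⟩ := gr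
          have hms : pvMatch (c :: r) (s.length + 1) = some (c :: g', rest') := by
            simp [pvMatch, hc, hcr, hm]
          rw [hm] at key
          simp only [hms]
          rw [show n + (((c :: g') : List Char).length : Int) = n + 1 + (g'.length : Int) by
            simp; omega]
          exact key

-- the fragment spans of cs from offset n on (contents already sorted), mirroring A's collection
def pvFrsF : Nat → Nat → List Char → List (Int × Int × List Char)
  | 0, _, _ => []
  | _, _, [] => []
  | fuel + 1, n, c :: r =>
    if c = '(' then
      match pvMatch r 1 with
      | none => []
      | some (g, rest) =>
          ((n : Int), (n : Int) + 1 + g.length, pvSortGroup g) :: pvFrsF fuel (n + g.length + 2) rest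
    else pvFrsF fuel (n + 1) r

def pvFrs (n : Nat) (cs : List Char) : List (Int × Int × List Char) := pvFrsF cs.length n cs

theorem pvFrsF_fuel : ∀ (f1 : Nat), ∀ (cs : List Char), ∀ (f2 n : Nat),
    cs.length ≤ f1 → cs.length ≤ f2 → pvFrsF f1 n cs = pvFrsF f2 n cs := by
  intro f1
  induction f1 with
  | zero =>
    intro cs f2 n h1 _
    have : cs = [] := by
      cases cs with
      | nil => rfl
      | cons a b => simp at h1
    subst this
    cases f2 <;> simp [pvFrsF]
  | succ f ih =>
    intro cs f2 n h1 h2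
    match cs with
    | [] => cases f2 <;> simp [pvFrsF]
    | c :: r =>
      match f2 with
      | 0 => simp at h2
      | f2' + 1 =>
        simp only [pvFrsF]
        by_cases hc : c = '('
        · simp only [hc, if_pos rfl]
          cases hm : pvMatch r 1 with
          | none => rfl
          | some gr =>
            obtain ⟨g, rest⟩ := gr
            have hlen := pvMatch_rest_length hm
            simp only [hm, if_true]
            rw [ih rest f2' (n + g.length + 2) (by simp at h1; omega) (by simp at h2; omega)]
        · simp only [if_neg hc]
          rw [ih r f2' (n + 1) (by simp at h1; omega) (by simp at h2; omega)]

theorem pvFrs_nil (n : Nat) : pvFrs n [] = [] := rfl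

theorem pvFrs_cons {c : Char} {r : List Char} (n : Nat) (hc : c ≠ '(') :
    pvFrs n (c :: r) = pvFrs (n + 1) r := by
  unfold pvFrs
  simp only [List.length_cons, pvFrsF, if_neg hc]

theorem pvFrs_par_none {r : List Char} (n : Nat) (hm : pvMatch r 1 = none) :
    pvFrs n ('(' :: r) = [] := by
  unfold pvFrs
  simp only [List.length_cons, pvFrsF, hm]
  simp only [if_true]

theorem pvFrs_par_some {r g rest : List Char} (n : Nat) (hm : pvMatch r 1 = some (g, rest)) :
    pvFrs n ('(' :: r)
      = ((n : Int), (n : Int) + 1 + g.length, pvSortGroup g) :: pvFrs (n + g.length + 2) rest := by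
  unfold pvFrs
  simp only [List.length_cons, pvFrsF, hm]
  simp only [if_true]
  rw [pvFrsF_fuel r.length rest rest.length (n + g.length + 2)
    (by have := pvMatch_rest_length hm; omega) (le_refl _)]

theorem pvDrop_cons {cs r : List Char} {c : Char} {n : Nat} (h : cs.drop n = c :: r) :
    cs.drop (n + 1) = r := by
  have := congrArg List.tail h
  simpa [List.tail_drop] using this

theorem pvAStep_top : ∀ (cs suf : List Char) (n : Nat) (F : List (Int × Int × List Char)),
    cs.drop n = suf → n ≤ cs.length →
    ((PySem.List.enumerate suf (n : Int)).foldl (pvAStep cs) ([], F)).2 = F ++ pvFrs n suf := by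
  intro cs suf
  induction hl : suf.length using Nat.strong_induction_on generalizing suf with
  | _ L ihn =>
    subst hl
    match suf with
    | [] => intro n F _ _; simp [pvFrs_nil, PySem.List.enumerate]
    | c :: r =>
      intro n F hdrop hn
      rw [PySem.List.enumerate_cons, List.foldl_cons]
      by_cases hc : c = '('
      · subst hc
        have hstep : pvAStep cs (([], F) : List Int × List (Int × Int × List Char)) ((n : Int), '(')
            = ([(n : Int)], F) := by simp [pvAStep]
        rw [hstep]
        have hdeep := pvAStep_deep cs (n : Int) r ((n : Int) + 1) [] F
        cases hm : pvMatch r 1 with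
        | none =>
          simp only [List.length_nil, Nat.zero_add, hm] at hdeep
          rw [show ((n : Int) :: ([] : List Int)) = [(n : Int)] from rfl] at hdeep
          rw [hdeep, pvFrs_par_none n hm]
          simp
        | some gr =>
          obtain ⟨g, rest⟩ := gr
          have hstruct := pvMatch_spec r 1 g rest hm
          simp only [List.length_nil, Nat.zero_add, hm] at hdeep
          rw [show ((n : Int) :: ([] : List Int)) = [(n : Int)] from rfl] at hdeep
          rw [hdeep]
          -- the recorded slice is exactly g
          have hdropn : cs.drop (n + 1) = g ++ ')' :: rest := by
            have h0 : cs.drop n = '(' :: (g ++ ')' :: rest) := by rw [hdrop, hstruct]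
            exact pvDrop_cons h0
          have hslice : PySem.List.slice cs (some ((n : Int) + 1)) (some ((n : Int) + 1 + g.length))
              = g := by
            rw [show (n : Int) + 1 = ((n + 1 : Nat) : Int) by push_cast; ring,
              show ((n + 1 : Nat) : Int) + (g.length : Int) = ((n + 1 + g.length : Nat) : Int) by
                push_cast; ring,
              PySem.List.slice_natCast,
              show n + 1 + g.length - (n + 1) = g.length by omega, hdropn]
            simp
          rw [hslice]
          have hbound : n + g.length + 2 ≤ cs.length := by
            have hr : (cs.drop (n + 1)).length = g.length + (rest.length + 1) := by
              rw [hdropn]; simp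
            simp at hr
            omega
          have hcm : cs.drop (n + 1 + g.length) = ')' :: rest := by
            rw [← List.drop_drop, hdropn]
            simp
          have hrest : cs.drop (n + g.length + 2) = rest := by
            rw [show n + g.length + 2 = n + 1 + g.length + 1 by omega]
            exact pvDrop_cons hcm
          have hlenrest : rest.length < ('(' :: r).length := by
            have := pvMatch_rest_length hm
            simp
            omega
          rw [show (n : Int) + 1 + (g.length : Int) + 1 = ((n + g.length + 2 : Nat) : Int) by
            push_cast; ring]
          rw [ihn rest.length hlenrest rest rfl (n + g.length + 2) _ hrest hbound]
          rw [pvFrs_par_some n hm]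
          simp
      · have hstep : pvAStep cs (([], F) : List Int × List (Int × Int × List Char)) ((n : Int), c)
            = ([], F) := by
          simp [pvAStep, hc]
        rw [hstep]
        have hdropn : cs.drop (n + 1) = r := pvDrop_cons hdrop
        have hn1 : n + 1 ≤ cs.length := by
          have : (cs.drop n).length = r.length + 1 := by rw [hdrop]; simp
          simp at this
          omega
        rw [show (n : Int) + 1 = ((n + 1 : Nat) : Int) by push_cast; ring]
        rw [ihn r.length (by simp) r rfl (n + 1) F hdropn hn1]
        rw [pvFrs_cons n hc]

-- == the reverse splice of the collected fragments renders pvS ==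

theorem pvSplice_render : ∀ (cs suf : List Char) (n : Nat),
    cs.drop n = suf → n ≤ cs.length →
    List.foldr
      (fun f acc =>
        PySem.List.slice acc none (some (f.1 + 1)) ++ f.2.2 ++ PySem.List.slice acc (some f.2.1) none)
      cs (pvFrs n suf)
    = cs.take n ++ pvS suf := by
  intro cs suf
  induction hl : suf.length using Nat.strong_induction_on generalizing suf with
  | _ L ihn =>
    subst hl
    match suf with
    | [] =>
      intro n hdrop _
      have hle : cs.length ≤ n := by
        have : (cs.drop n).length = 0 := by rw [hdrop]; simp
        simp at this
        omega
      simp [pvFrs_nil, pvS_nil, List.take_of_length_le hle]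
    | c :: r =>
      intro n hdrop hn
      have hn' : n < cs.length := by
        have : (cs.drop n).length = r.length + 1 := by rw [hdrop]; simp
        simp at this
        omega
      have hcsn : cs.take (n + 1) = cs.take n ++ [c] := by
        rw [List.take_add, hdrop]
        simp
      have hdropn : cs.drop (n + 1) = r := pvDrop_cons hdrop
      by_cases hc : c = '('
      · subst hc
        cases hm : pvMatch r 1 with
        | none =>
          rw [pvFrs_par_none n hm, pvS_par_none hm]
          simp only [List.foldr_nil]
          conv_lhs => rw [← List.take_append_drop n cs]
          rw [hdrop]
        | some gr =>
          obtain ⟨g, rest⟩ := gr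
          have hstruct := pvMatch_spec r 1 g rest hm
          have hdropg : cs.drop (n + 1) = g ++ ')' :: rest := by rw [hdropn, hstruct]
          have hcm : cs.drop (n + 1 + g.length) = ')' :: rest := by
            rw [← List.drop_drop, hdropg]
            simp
          have hbound : n + 1 + g.length < cs.length := by
            have : (cs.drop (n + 1 + g.length)).length = rest.length + 1 := by rw [hcm]; simp
            simp at this
            omega
          have hrest : cs.drop (n + 1 + g.length + 1) = rest := pvDrop_cons hcm
          have hlenrest : rest.length < ('(' :: r).length := by
            have := pvMatch_rest_length hm
            simp
            omega
          have IH := ihn rest.length hlenrest rest rfl (n + 1 + g.length + 1) hrest (by omega)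
          rw [pvFrs_par_some n hm, List.foldr_cons,
            show n + g.length + 2 = n + 1 + g.length + 1 by omega, IH]
          -- one splice step on (cs.take (n + 1 + g.length + 1) ++ pvS rest)
          have hsliceL :
              PySem.List.slice (cs.take (n + 1 + g.length + 1) ++ pvS rest) none (some ((n : Int) + 1))
              = cs.take (n + 1) := by
            rw [show (n : Int) + 1 = ((n + 1 : Nat) : Int) by push_cast; ring,
              PySem.List.slice_to_natCast,
              List.take_append_of_le_length (by rw [List.length_take]; omega),
              List.take_take]
            rw [show min (n + 1) (n + 1 + g.length + 1) = n + 1 by omega]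
          have hsliceR :
              PySem.List.slice (cs.take (n + 1 + g.length + 1) ++ pvS rest)
                (some ((n : Int) + 1 + g.length)) none
              = ')' :: pvS rest := by
            rw [show (n : Int) + 1 + (g.length : Int) = ((n + 1 + g.length : Nat) : Int) by
              push_cast; ring,
              PySem.List.slice_from_natCast,
              List.drop_append_of_le_length (by rw [List.length_take]; omega)]
            have hdt : (cs.take (n + 1 + g.length + 1)).drop (n + 1 + g.length)
                = [cs[n + 1 + g.length]] := by
              rw [List.drop_take, show n + 1 + g.length + 1 - (n + 1 + g.length) = 1 by omega,
                List.take_one_drop_eq_of_lt_length hbound]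
              rfl
            rw [hdt]
            have hpar : cs[n + 1 + g.length] = ')' := by
              have h1 := hcm
              rw [List.drop_eq_getElem_cons hbound] at h1
              exact (List.cons_eq_cons.mp h1).1
            rw [hpar]
            simp
          simp only [hsliceL, hsliceR]
          rw [hcsn, pvS_par_some hm]
          simp
      · rw [pvFrs_cons n hc, ihn r.length (by simp) r rfl (n + 1) hdropn (by omega), hcsn,
          pvS_cons hc]
        simp

-- ===== VERDICT (by name: the statement is the Claim_ definition above) =====
theorem sort_within_parentheses_spec : Claim_equal_sort_within_parentheses := by
  unfold Claim_equal_sort_within_parentheses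
  intro import_line _ _
  unfold Spec_sort_within_parentheses
  unfold sort_within_parentheses sort_within_parentheses_alt
  simp only []
  set cs := import_line.toList with hcs
  have hA2 : ((PySem.List.enumerate cs (0 : Int)).foldl (pvAStep cs) ([], [])).2 = pvFrs 0 cs := by
    have := pvAStep_top cs cs 0 [] (by simp) (by omega)
    simpa using this
  rw [hA2, List.foldl_reverse]
  have hrender := pvSplice_render cs cs 0 (by simp) (by omega)
  rw [hrender]
  simp
  rw [pvAltGo_top cs []]
  simp
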